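-- pv_equiv track=rewrite | github.com/Nordlys-Labs/nordlys | benchmarks/swe_smith/profiler.py | calculate_cluster_stats
-- ===== SOURCE A (Python) =====
-- from collections import defaultdict
--
-- def calculate_cluster_stats(
--     cluster_map: dict[str, int], results: dict[str, bool]
-- ) -> dict[int, dict[str, int]]:
--     """Calculate resolved/total counts per cluster.
--
--     Args:
--         cluster_map: Mapping from instance_id to cluster_id.
--         results: Mapping from instance_id to resolved status.
--
--     Returns:
--         Dictionary mapping cluster_id to {"total": N, "resolved": M}.
--     """
--     stats: dict[int, dict[str, int]] = defaultdict(lambda: {"total": 0, "resolved": 0})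
--
--     for inst_id, resolved in results.items():
--         if inst_id not in cluster_map:
--             continue
--         cluster_id = cluster_map[inst_id]
--         stats[cluster_id]["total"] += 1
--         if resolved:
--             stats[cluster_id]["resolved"] += 1
--
--     return dict(stats)
-- ===== SOURCE B (Python) =====
-- from collections import Counter
--
--
-- def calculate_cluster_stats(cluster_map, results):
--     """Calculate resolved/total counts per cluster (filter + two Counter tallies)."""
--     pairs = [(cluster_map[inst_id], resolved)
--              for inst_id, resolved in results.items()
--              if inst_id in cluster_map]
--     totals = Counter(cid for cid, _ in pairs)
--     resolved_counts = Counter(cid for cid, resolved in pairs if resolved)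
--     return {cid: {"total": n, "resolved": resolved_counts.get(cid, 0)}
--             for cid, n in totals.items()}
-- ===== Notes on version B (the rewrite author's own statement) =====
-- stated objective: idiomatic
-- what changed: A's single pass that mutates a defaultdict of per-cluster counter dicts in place is replaced by a filter producing (cluster_id, resolved) pairs followed by two grouped Counter tallies (totals and resolved) that are zipped into the result dict.
import Mathlib
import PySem

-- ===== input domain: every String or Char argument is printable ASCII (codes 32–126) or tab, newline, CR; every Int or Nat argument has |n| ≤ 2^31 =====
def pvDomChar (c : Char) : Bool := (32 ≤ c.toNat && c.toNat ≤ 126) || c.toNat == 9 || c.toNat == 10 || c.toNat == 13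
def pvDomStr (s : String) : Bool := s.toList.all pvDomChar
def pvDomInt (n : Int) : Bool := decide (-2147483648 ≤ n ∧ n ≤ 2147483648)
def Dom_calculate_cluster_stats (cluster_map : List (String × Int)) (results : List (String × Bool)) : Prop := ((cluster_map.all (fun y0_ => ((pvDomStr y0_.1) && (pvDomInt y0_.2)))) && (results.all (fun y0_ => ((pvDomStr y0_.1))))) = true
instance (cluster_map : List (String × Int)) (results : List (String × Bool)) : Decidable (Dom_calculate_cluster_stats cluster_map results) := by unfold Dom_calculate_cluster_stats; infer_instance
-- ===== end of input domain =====

-- B replaces A's single inline-incrementing defaultdict pass by filter + two Counter tallies (idiomatic; same cost).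

-- ===== PORT A =====
-- one result entry of A's loop: skip if not in cluster_map, else bump "total" (and "resolved" if resolved)
def aStep (cm : PySem.Dict String Int) (stats : PySem.Dict Int (PySem.Dict String Int))
    (p : String × Bool) : PySem.Dict Int (PySem.Dict String Int) :=
  match cm.get? p.1 with
  | none => stats
  | some cid =>
    let entry := stats.getD cid (PySem.Dict.mk [("total", 0), ("resolved", 0)])
    let entry := entry.insert "total" (entry.getD "total" 0 + 1)
    let entry := if p.2 then entry.insert "resolved" (entry.getD "resolved" 0 + 1) else entry
    stats.insert cid entry

def calculate_cluster_stats (cluster_map : List (String × Int)) (results : List (String × Bool)) : List (Int × List (String × Int)) :=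
  let cm : PySem.Dict String Int := PySem.Dict.mk cluster_map
  let stats := results.foldl (aStep cm) PySem.Dict.empty
  stats.items.map (fun p => (p.1, p.2.items))

-- ===== PORT B =====
def calculate_cluster_stats_alt (cluster_map : List (String × Int)) (results : List (String × Bool)) : List (Int × List (String × Int)) :=
  let cm : PySem.Dict String Int := PySem.Dict.mk cluster_map
  let pairs : List (Int × Bool) := results.filterMap (fun p => (cm.get? p.1).map (fun c => (c, p.2)))
  let totals := PySem.Dict.counter (pairs.map (·.1))
  let resolvedCounts := PySem.Dict.counter ((pairs.filter (·.2)).map (·.1))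
  totals.items.map (fun p => (p.1, [("total", p.2), ("resolved", resolvedCounts.getD p.1 0)]))

-- ===== PRECONDITION & SPEC =====
def Spec_calculate_cluster_stats (cluster_map : List (String × Int)) (results : List (String × Bool)) (out : List (Int × List (String × Int))) : Prop := out = calculate_cluster_stats_alt cluster_map results
instance (cluster_map : List (String × Int)) (results : List (String × Bool)) (out : List (Int × List (String × Int))) : Decidable (Spec_calculate_cluster_stats cluster_map results out) := by unfold Spec_calculate_cluster_stats; infer_instance

-- ===== CLAIM (what is proved, stated in full; the proofs are below) =====
def Claim_equal_calculate_cluster_stats : Prop := ∀ (cluster_map : List (String × Int)) (results : List (String × Bool)), Dom_calculate_cluster_stats cluster_map results → Spec_calculate_cluster_stats cluster_map results (calculate_cluster_stats cluster_map results)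

-- ===== LEMMAS AND PROOFS =====

-- the (cluster_id, resolved)-level step of A's loop (its body once the instance is found)
def pStep (stats : PySem.Dict Int (PySem.Dict String Int)) (q : Int × Bool) :
    PySem.Dict Int (PySem.Dict String Int) :=
  let entry := stats.getD q.1 (PySem.Dict.mk [("total", 0), ("resolved", 0)])
  let entry := entry.insert "total" (entry.getD "total" 0 + 1)
  let entry := if q.2 then entry.insert "resolved" (entry.getD "resolved" 0 + 1) else entry
  stats.insert q.1 entry

-- A's loop over results is the pair-level loop over the filtered (cluster_id, resolved) pairs
lemma foldl_aStep_eq_filterMap (cm : PySem.Dict String Int) (results : List (String × Bool))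
    (d : PySem.Dict Int (PySem.Dict String Int)) :
    results.foldl (aStep cm) d =
      (results.filterMap (fun p => (cm.get? p.1).map (fun c => (c, p.2)))).foldl pStep d := by
  induction results generalizing d with
  | nil => rfl
  | cons p t ih =>
    simp only [List.foldl_cons, List.filterMap_cons]
    cases h : cm.get? p.1 with
    | none => simp [aStep, h, ih]
    | some cid => simp [aStep, pStep, h, ih]

-- the per-cluster {"total": …, "resolved": …} dict after processing the pair list l
def innerOf (l : List (Int × Bool)) (c : Int) : PySem.Dict String Int :=
  PySem.Dict.mk [("total", ((l.map (·.1)).count c : Int)),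
                 ("resolved", (((l.filter (·.2)).map (·.1)).count c : Int))]

lemma innerOf_append_self (l : List (Int × Bool)) (q : Int × Bool) :
    innerOf (l ++ [q]) q.1 =
      PySem.Dict.mk [("total", ((l.map (·.1)).count q.1 : Int) + 1),
                     ("resolved", (((l.filter (·.2)).map (·.1)).count q.1 : Int)
                        + (if q.2 then 1 else 0))] := by
  cases hb : q.2 <;>
    simp [innerOf, List.filter_append, List.count_append, hb]

lemma innerOf_append_of_ne (l : List (Int × Bool)) (q : Int × Bool) (c : Int) (h : c ≠ q.1) :
    innerOf (l ++ [q]) c = innerOf l c := by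
  cases hb : q.2 <;>
    simp [innerOf, List.filter_append, List.count_append, hb, Ne.symm h]

-- characterization of A's accumulated stats dict: one entry per first occurrence, holding the two counts
lemma items_foldl_pStep (l : List (Int × Bool)) :
    (l.foldl pStep PySem.Dict.empty).items =
      (PySem.Set.ofList (l.map (·.1))).map (fun c => (c, innerOf l c)) := by
  induction l using List.reverseRecOn with
  | nil => rfl
  | append_singleton l q ih =>
    have hkeys : (l.foldl pStep PySem.Dict.empty).keys = PySem.Set.ofList (l.map (·.1)) := by
      simp [PySem.Dict.keys, ih, Function.comp_def]
    have hnd : (l.foldl pStep PySem.Dict.empty).keys.Nodup := by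
      rw [hkeys]; exact PySem.Set.nodup_ofList _
    rw [List.foldl_append, List.foldl_cons, List.foldl_nil]
    simp only [List.map_append, List.map_cons, List.map_nil]
    rw [PySem.Set.ofList_append_singleton]
    by_cases hq : q.1 ∈ PySem.Set.ofList (l.map (·.1))
    · -- existing cluster: the entry at q.1 is updated in place
      have hmem : (q.1, innerOf l q.1) ∈ (l.foldl pStep PySem.Dict.empty).items := by
        rw [ih]; exact List.mem_map_of_mem hq
      have hgetD : (l.foldl pStep PySem.Dict.empty).getD q.1
          (PySem.Dict.mk [("total", 0), ("resolved", 0)]) = innerOf l q.1 :=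
        PySem.Dict.getD_of_mem_items _ hmem hnd _
      have hcont : (l.foldl pStep PySem.Dict.empty).contains q.1 = true := by
        rw [PySem.Dict.contains_eq_decide_mem_keys, hkeys]; simpa using hq
      have hentry : (let entry := innerOf l q.1;
          let entry := entry.insert "total" (entry.getD "total" 0 + 1);
          if q.2 then entry.insert "resolved" (entry.getD "resolved" 0 + 1) else entry)
          = innerOf (l ++ [q]) q.1 := by
        rw [innerOf_append_self]
        cases hb : q.2 <;>
          simp [innerOf, PySem.Dict.insert, PySem.Dict.getD, PySem.Dict.get?, PySem.Dict.contains]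
      rw [PySem.Set.add_of_mem hq]
      simp only [pStep, hgetD, hentry]
      rw [PySem.Dict.items_insert_of_contains _ _ hcont, ih, List.map_map]
      refine List.map_congr_left (fun c hc => ?_)
      by_cases hcq : c = q.1
      · simp [hcq]
      · simp [Function.comp, hcq, innerOf_append_of_ne l q c hcq]
    · -- new cluster: a fresh entry is appended
      have hcont : (l.foldl pStep PySem.Dict.empty).contains q.1 = false := by
        rw [PySem.Dict.contains_eq_decide_mem_keys, hkeys]; simpa using hq
      have hgetD : (l.foldl pStep PySem.Dict.empty).getD q.1
          (PySem.Dict.mk [("total", 0), ("resolved", 0)])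
          = PySem.Dict.mk [("total", 0), ("resolved", 0)] :=
        PySem.Dict.getD_of_not_contains _ _ hcont
      have hq' : q.1 ∉ l.map (·.1) := by
        intro h; exact hq ((PySem.Set.mem_ofList _ _).mpr h)
      have hcount : (l.map (·.1)).count q.1 = 0 := List.count_eq_zero.mpr hq'
      have hcount2 : ((l.filter (·.2)).map (·.1)).count q.1 = 0 := by
        refine List.count_eq_zero.mpr (fun h => hq' ?_)
        obtain ⟨p, hp, hpe⟩ := List.mem_map.mp h
        exact List.mem_map.mpr ⟨p, (List.mem_filter.mp hp).1, hpe⟩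
      have hentry : (let entry := PySem.Dict.mk ([("total", (0:Int)), ("resolved", 0)]);
          let entry := entry.insert "total" (entry.getD "total" 0 + 1);
          if q.2 then entry.insert "resolved" (entry.getD "resolved" 0 + 1) else entry)
          = innerOf (l ++ [q]) q.1 := by
        rw [innerOf_append_self, hcount, hcount2]
        cases hb : q.2 <;>
          simp [PySem.Dict.insert, PySem.Dict.getD, PySem.Dict.get?, PySem.Dict.contains]
      rw [PySem.Set.add_of_not_mem hq]
      simp only [pStep, hgetD, hentry]
      rw [PySem.Dict.items_insert_of_not_contains _ _ hcont, ih, List.map_append]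
      congr 1
      refine List.map_congr_left (fun c hc => ?_)
      have hcq : c ≠ q.1 := fun h => hq (h ▸ hc)
      rw [innerOf_append_of_ne l q c hcq]

-- ===== VERDICT (by name: the statement is the Claim_ definition above) =====
theorem calculate_cluster_stats_spec : Claim_equal_calculate_cluster_stats := by
  intro cluster_map results _
  unfold Spec_calculate_cluster_stats calculate_cluster_stats calculate_cluster_stats_alt
  dsimp only
  rw [foldl_aStep_eq_filterMap, items_foldl_pStep, PySem.Dict.items_counter]
  simp [List.map_map, PySem.Dict.getD_counter, innerOf, Function.comp_def]
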